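-- pv_equiv track=rewrite | github.com/gmontamat/advent-of-code | python/2024/19/solution1.py | dfs
-- ===== SOURCE A (Python) =====
-- def dfs(pattern, towels):
--     if pattern == "":
--         return True
--     else:
--         for towel in towels:
--             if towel == pattern[: len(towel)]:
--                 return dfs(pattern[len(towel) :], towels)
--     return False
-- ===== SOURCE B (Python) =====
-- def dfs(pattern, towels):
--     while pattern:
--         match = next((t for t in towels if pattern.startswith(t)), None)
--         if match is None:
--             return False
--         pattern = pattern[len(match):]
--     return True
-- ===== Notes on version B (the rewrite author's own statement) =====
-- stated objective: idiomatic
-- what changed: Replaces A's tail-recursive chain by an explicit while-loop over a local pattern variable whose body finds the first matching towel with next()/startswith, eliminating the recursion.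
import Mathlib
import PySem

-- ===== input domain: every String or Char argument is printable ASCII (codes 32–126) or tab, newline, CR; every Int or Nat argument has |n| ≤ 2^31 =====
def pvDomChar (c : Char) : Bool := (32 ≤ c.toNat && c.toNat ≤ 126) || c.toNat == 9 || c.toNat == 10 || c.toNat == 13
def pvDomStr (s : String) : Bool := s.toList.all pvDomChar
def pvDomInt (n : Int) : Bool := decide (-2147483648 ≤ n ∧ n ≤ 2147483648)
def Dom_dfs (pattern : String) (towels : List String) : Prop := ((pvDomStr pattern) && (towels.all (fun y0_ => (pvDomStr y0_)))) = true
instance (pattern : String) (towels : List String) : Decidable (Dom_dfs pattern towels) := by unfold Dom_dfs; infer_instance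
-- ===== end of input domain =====

-- B replaces A's tail-recursive chain by an explicit while-loop that finds the first
-- matching towel with startswith; same greedy no-backtrack strategy, no recursion.
-- Pre_ excludes exactly the inputs on which Python A raises RecursionError
-- (an empty-string towel with a nonempty pattern); B loops forever there too.

-- ===== PORT A =====
-- A recurses; each Python call consumes one unit of fuel.  When every matching towel is
-- nonempty (all inputs in Pre_), pattern.length + 1 fuel is enough, so the fuel-out
-- branch (false) is never reached on admitted inputs.
-- Inner for-loop over towels: returns at the first towel with towel == pattern[:len(towel)]
-- (pattern[:n], n ≥ 0, is List.take n).
mutual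
  def dfsRecA (fuel : Nat) (pattern : List Char) (towels : List String) : Bool :=
    match fuel with
    | 0 => false
    | fuel + 1 =>
      if pattern = [] then true
      else dfsForA fuel pattern towels towels
  termination_by (fuel, 0)
  def dfsForA (fuel : Nat) (pattern : List Char) (rest towels : List String) : Bool :=
    match rest with
    | [] => false
    | towel :: rest' =>
      if towel.toList = pattern.take towel.toList.length then
        dfsRecA fuel (pattern.drop towel.toList.length) towels
      else
        dfsForA fuel pattern rest' towels
  termination_by (fuel, rest.length + 1)
end

def dfs (pattern : String) (towels : List String) : Bool :=
  dfsRecA (pattern.toList.length + 1) pattern.toList towels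

-- ===== PORT B =====
-- Source B's while-loop: state is the remaining pattern; each iteration finds the first towel
-- with pattern.startswith(towel) (none → False) and drops it; empty pattern → True.
-- Same fuel bound as A's port; the fuel-out branch is unreachable on admitted inputs.
def dfsLoopB (fuel : Nat) (pattern : List Char) (towels : List String) : Bool :=
  match fuel with
  | 0 => false
  | fuel + 1 =>
    if pattern = [] then true
    else
      match towels.find? (fun t => PySem.Chars.startswith pattern t.toList) with
      | none => false
      | some t => dfsLoopB fuel (pattern.drop t.toList.length) towels

def dfs_alt (pattern : String) (towels : List String) : Bool :=
  dfsLoopB (pattern.toList.length + 1) pattern.toList towels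

-- ===== PRECONDITION & SPEC =====
-- Pre_ excludes exactly the inputs where Python A raises RecursionError (and B diverges):
-- an empty towel together with a nonempty pattern, since "" matches every prefix and the
-- pattern never shrinks.
def Pre_dfs (pattern : String) (towels : List String) : Prop :=
  pattern = "" ∨ ¬ ("" ∈ towels)
instance (pattern : String) (towels : List String) : Decidable (Pre_dfs pattern towels) := by
  unfold Pre_dfs; infer_instance
def pvWitness_dfs : String × List String := ("brwrr", ["b", "r", "wr", "g"])
def Spec_dfs (pattern : String) (towels : List String) (out : Bool) : Prop := out = dfs_alt pattern towels
instance (pattern : String) (towels : List String) (out : Bool) : Decidable (Spec_dfs pattern towels out) := by unfold Spec_dfs; infer_instance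

-- ===== CLAIM (what is proved, stated in full; the proofs are below) =====
def Claim_equal_dfs : Prop := ∀ (pattern : String) (towels : List String), Dom_dfs pattern towels → Pre_dfs pattern towels → Spec_dfs pattern towels (dfs pattern towels)

-- ===== LEMMAS AND PROOFS =====

-- The two match predicates coincide: towel == pattern[:len(towel)]  ↔  pattern.startswith(towel).
theorem matchPred_eq (p : List Char) (t : String) :
    (t.toList = p.take t.toList.length) = (PySem.Chars.startswith p t.toList = true) := by
  simp only [eq_iff_iff, PySem.Chars.startswith_iff]
  constructor
  · intro h
    exact h ▸ List.take_prefix _ _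
  · intro h
    exact (List.prefix_iff_eq_take.mp h)

-- A's inner for-loop is the first-match search B performs with find?.
theorem dfsForA_eq_find (fuel : Nat) (p : List Char) (rest towels : List String) :
    dfsForA fuel p rest towels =
      match rest.find? (fun t => PySem.Chars.startswith p t.toList) with
      | none => false
      | some t => dfsRecA fuel (p.drop t.toList.length) towels := by
  induction rest with
  | nil => simp [dfsForA]
  | cons t rest' ih =>
    rw [dfsForA]
    by_cases h : t.toList = p.take t.toList.length
    · have hs : PySem.Chars.startswith p t.toList = true := (matchPred_eq p t) ▸ h
      have hf : List.find? (fun t => PySem.Chars.startswith p t.toList) (t :: rest') = some t :=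
        List.find?_cons_of_pos (by simpa using hs)
      rw [if_pos h, hf]
    · have hs : PySem.Chars.startswith p t.toList = false := by
        rw [← Bool.not_eq_true]; exact (matchPred_eq p t) ▸ h
      have hf : List.find? (fun t => PySem.Chars.startswith p t.toList) (t :: rest') =
          List.find? (fun t => PySem.Chars.startswith p t.toList) rest' :=
        List.find?_cons_of_neg (by simpa using hs)
      rw [if_neg h, ih, hf]

-- The two ports agree step for step, for every fuel.
theorem dfsRecA_eq_loop (fuel : Nat) (p : List Char) (towels : List String) :
    dfsRecA fuel p towels = dfsLoopB fuel p towels := by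
  induction fuel generalizing p with
  | zero => simp [dfsRecA, dfsLoopB]
  | succ f ih =>
    rw [dfsRecA, dfsLoopB]
    by_cases hp : p = []
    · simp [hp]
    · simp only [if_neg hp, dfsForA_eq_find]
      cases towels.find? (fun t => PySem.Chars.startswith p t.toList) with
      | none => rfl
      | some t => exact ih _

-- ===== VERDICT (by name: the statement is the Claim_ definition above) =====
theorem dfs_spec : Claim_equal_dfs := by
  intro pattern towels _ _
  unfold Spec_dfs dfs dfs_alt
  exact dfsRecA_eq_loop _ _ _
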